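-- pv_equiv track=rewrite | github.com/pedrofariacomposer/comptools | comptools/basic_tools.py | simple_multiplication
-- ===== SOURCE A (Python) =====
-- from typing import Dict, Sequence, List
--
-- def transposition_pitch_classes(
--     pitch_classes: Sequence,
--     transposing_factor: int,
-- ) -> List:
--
--     """Finds the transposition of a sequence of pitch-classes by a transposing factor.
--     """
--
--     return [(pitch + transposing_factor) % 12 for pitch in pitch_classes]
--
-- def rotate_sequence(
--     sequence: Sequence,
--     new_first_element_index: int,
-- ) -> List:
--
--     """Rotates any sequence, making it start on the new given index
--     """
--
--     sequence_copy_list = [element for element in sequence]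
--     return sequence_copy_list[new_first_element_index:] + sequence_copy_list[:new_first_element_index]
--
-- def most_compact(
--     a: Sequence,
--     b: Sequence,
-- ) -> Sequence:
--
--     """ Compares two lists and returns the one that is more compact, as defined by Forte and Straus.
--     Function written by Raphael Santos.
--     """
--
--     for i in range(len(a) - 1, 0, -1):
--         a_diff = (a[i] - a[0]) % 12
--         b_diff = (b[i] - b[0]) % 12
--         if a_diff < b_diff:
--             return a
--         elif a_diff > b_diff:
--             return b
--     if a[0] < b[0]:
--         return a
--     else:
--         return b
--
-- def normal_form(
--     pcset: Sequence,
-- ) -> Sequence: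
--
--     """Returns the Normal Form of a sequence of pitch classes.
--     Function written by Raphael Santos.
--     """
--
--     uniques = list(set(pcset))
--     uniques.sort()
--     best = uniques
--     for i in range(1, len(uniques)):
--         best = most_compact(best, rotate_sequence(uniques, i))
--     return best
--
-- def simple_multiplication(
--     multiplicand: Sequence,
--     multiplier: Sequence,
-- ) -> List:
--
--     """Applies simple pitch class set multiplication onto two pitch class sets.
--        See: Heinemann - Pitch Class Set Multiplication in Theory and Practice.
--     """
--     ois = transposition_pitch_classes(multiplicand, -multiplicand[0])
--
--     multiplication_result = []
--     for i in multiplier: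
--         multiplier_ois = normal_form(transposition_pitch_classes(ois, i-ois[0]))
--         for element in multiplier_ois:
--             if element not in multiplication_result:
--                 multiplication_result.append(element)
--
--     return normal_form(multiplication_result)
-- ===== SOURCE B (Python) =====
-- def simple_multiplication(multiplicand, multiplier):
--     """Simple pitch class set multiplication, computed directly:
--     after transposing the multiplicand to start at 0, the product set is
--     {(p - multiplicand[0] + i) % 12 for p, i}, and its normal form is the
--     rotation of its sorted form that minimizes the Forte/Straus key."""
--     m0 = multiplicand[0]
--     pcs = sorted({(p - m0 + i) % 12 for p in multiplicand for i in multiplier})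
--     if not pcs:
--         return []
--     n = len(pcs)
--     rotations = [pcs[k:] + pcs[:k] for k in range(n)]
--     return min(rotations,
--                key=lambda r: [(r[j] - r[0]) % 12 for j in range(n - 1, 0, -1)] + [r[0]])
-- ===== Notes on version B (the rewrite author's own statement) =====
-- stated objective: simpler
-- what changed: B builds the product pitch-class set {(p - multiplicand[0] + i) % 12} directly with one set comprehension and returns the normal form as the minimum-by-key rotation of its sorted list, eliminating A's per-multiplier normal_form calls, the incremental 'not in' accumulation, and the pairwise most_compact tournament.
import Mathlib
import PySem

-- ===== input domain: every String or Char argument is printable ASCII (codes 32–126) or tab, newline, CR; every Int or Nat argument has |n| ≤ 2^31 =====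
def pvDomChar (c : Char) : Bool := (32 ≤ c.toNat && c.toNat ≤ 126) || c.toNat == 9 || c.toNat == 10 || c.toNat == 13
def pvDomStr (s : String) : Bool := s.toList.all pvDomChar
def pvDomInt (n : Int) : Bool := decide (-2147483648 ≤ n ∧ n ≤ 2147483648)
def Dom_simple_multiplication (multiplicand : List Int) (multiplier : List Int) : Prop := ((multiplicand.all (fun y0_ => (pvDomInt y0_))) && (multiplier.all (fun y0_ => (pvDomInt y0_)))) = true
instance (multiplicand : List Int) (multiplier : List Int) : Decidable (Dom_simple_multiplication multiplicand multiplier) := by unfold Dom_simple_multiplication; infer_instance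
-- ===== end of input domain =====

-- B computes the product pitch-class set in one pass and picks the minimal rotation by key,
-- replacing A's per-multiplier normal_form calls and incremental 'not in' accumulation (objective: simpler).

-- ===== PORT A =====
def transposition_pitch_classes (pitch_classes : List Int) (transposing_factor : Int) : List Int :=
  pitch_classes.map (fun pitch => PySem.Int.mod (pitch + transposing_factor) 12)

def rotate_sequence (sequence : List Int) (new_first_element_index : Int) : List Int :=
  PySem.List.slice sequence (some new_first_element_index) none ++
  PySem.List.slice sequence none (some new_first_element_index)

-- the 'for i in range(len(a)-1, 0, -1)' loop of most_compact, over the remaining indices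
def mcLoop (a b : List Int) : List Int → List Int
  | [] => if PySem.List.pyGetD a 0 0 < PySem.List.pyGetD b 0 0 then a else b
  | i :: rest =>
    let a_diff := PySem.Int.mod (PySem.List.pyGetD a i 0 - PySem.List.pyGetD a 0 0) 12
    let b_diff := PySem.Int.mod (PySem.List.pyGetD b i 0 - PySem.List.pyGetD b 0 0) 12
    if a_diff < b_diff then a else if b_diff < a_diff then b else mcLoop a b rest

def most_compact (a b : List Int) : List Int :=
  mcLoop a b (PySem.List.pyRange ((a.length : Int) - 1) 0 (-1))

def normal_form (pcset : List Int) : List Int :=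
  let uniques := PySem.List.sorted (PySem.Set.ofList pcset) (fun x => x) false
  (PySem.List.pyRange 1 (uniques.length : Int) 1).foldl
    (fun best i => most_compact best (rotate_sequence uniques i)) uniques

def simple_multiplication (multiplicand : List Int) (multiplier : List Int) : List Int :=
  match PySem.List.pyGet? multiplicand 0 with
  | none => []   -- multiplicand[0] raises IndexError in Python; excluded by Pre_
  | some m0 =>
    let ois := transposition_pitch_classes multiplicand (-m0)
    let result := multiplier.foldl (fun acc i =>
      (normal_form (transposition_pitch_classes ois (i - PySem.List.pyGetD ois 0 0))).foldl
        (fun acc2 element => if element ∈ acc2 then acc2 else acc2 ++ [element]) acc) []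
    normal_form result

-- ===== PORT B =====
-- Source B's 'key=lambda r: [(r[j]-r[0]) % 12 for j in range(n-1, 0, -1)] + [r[0]]'  (n = len(r))
def nf_key (r : List Int) : List Int :=
  ((PySem.List.pyRange ((r.length : Int) - 1) 0 (-1)).map
     (fun j => PySem.Int.mod (PySem.List.pyGetD r j 0 - PySem.List.pyGetD r 0 0) 12)) ++
  [PySem.List.pyGetD r 0 0]

def simple_multiplication_alt (multiplicand : List Int) (multiplier : List Int) : List Int :=
  match PySem.List.pyGet? multiplicand 0 with
  | none => []   -- multiplicand[0] raises IndexError in Python; excluded by Pre_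
  | some m0 =>
    let pcs := PySem.List.sorted
      (PySem.Set.ofList (multiplicand.flatMap (fun p =>
        multiplier.map (fun i => PySem.Int.mod (p - m0 + i) 12))))
      (fun x => x) false
    if pcs = [] then []
    else
      let rotations := (PySem.List.pyRange 0 (pcs.length : Int) 1).map
        (fun k => PySem.List.slice pcs (some k) none ++ PySem.List.slice pcs none (some k))
      (PySem.List.min? rotations nf_key).getD []

-- ===== PRECONDITION & SPEC =====
-- Pre_ excludes only the empty multiplicand, on which Python's multiplicand[0] raises IndexError.
def Pre_simple_multiplication (multiplicand : List Int) (multiplier : List Int) : Prop :=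
  multiplicand ≠ []
instance (multiplicand : List Int) (multiplier : List Int) : Decidable (Pre_simple_multiplication multiplicand multiplier) := by unfold Pre_simple_multiplication; infer_instance

def pvWitness_simple_multiplication : List Int × List Int := ([0, 4, 7], [0, 3])

def Spec_simple_multiplication (multiplicand : List Int) (multiplier : List Int) (out : List Int) : Prop := out = simple_multiplication_alt multiplicand multiplier
instance (multiplicand : List Int) (multiplier : List Int) (out : List Int) : Decidable (Spec_simple_multiplication multiplicand multiplier out) := by unfold Spec_simple_multiplication; infer_instance

-- ===== CLAIM (what is proved, stated in full; the proofs are below) =====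
def Claim_equal_simple_multiplication : Prop := ∀ (multiplicand : List Int) (multiplier : List Int), Dom_simple_multiplication multiplicand multiplier → Pre_simple_multiplication multiplicand multiplier → Spec_simple_multiplication multiplicand multiplier (simple_multiplication multiplicand multiplier)

-- ===== LEMMAS AND PROOFS =====

-- mcLoop returns one of its two arguments
theorem mcLoop_eq_or (a b : List Int) (is : List Int) :
    mcLoop a b is = a ∨ mcLoop a b is = b := by
  induction is with
  | nil => simp only [mcLoop]; split_ifs <;> tauto
  | cons i rest ih => simp only [mcLoop]; split_ifs <;> tauto

-- keyOn: the partial key built from an index list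
def keyOn (r : List Int) (is : List Int) : List Int :=
  is.map (fun j => PySem.Int.mod (PySem.List.pyGetD r j 0 - PySem.List.pyGetD r 0 0) 12)

theorem keyOn_cons (r : List Int) (i : Int) (is : List Int) :
    keyOn r (i :: is) =
      PySem.Int.mod (PySem.List.pyGetD r i 0 - PySem.List.pyGetD r 0 0) 12 :: keyOn r is := rfl

theorem mcLoop_closed (a b : List Int) (is : List Int) :
    mcLoop a b is =
      if (keyOn a is ++ [PySem.List.pyGetD a 0 0]) < (keyOn b is ++ [PySem.List.pyGetD b 0 0])
      then a else b := by
  induction is with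
  | nil =>
    simp only [mcLoop, keyOn, List.map_nil, List.nil_append]
    have h : (([PySem.List.pyGetD a 0 0] : List Int) < [PySem.List.pyGetD b 0 0]) ↔
        PySem.List.pyGetD a 0 0 < PySem.List.pyGetD b 0 0 := by
      rw [List.cons_lt_cons_iff]
      simp
    simp only [h]
  | cons i rest ih =>
    simp only [mcLoop, keyOn_cons, List.cons_append]
    set ad := PySem.Int.mod (PySem.List.pyGetD a i 0 - PySem.List.pyGetD a 0 0) 12 with had
    set bd := PySem.Int.mod (PySem.List.pyGetD b i 0 - PySem.List.pyGetD b 0 0) 12 with hbd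
    by_cases h1 : ad < bd
    · rw [if_pos h1, if_pos]
      rw [List.cons_lt_cons_iff]; exact Or.inl h1
    · by_cases h2 : bd < ad
      · rw [if_neg h1, if_pos h2, if_neg]
        rw [List.cons_lt_cons_iff]
        rintro (h | ⟨h, -⟩) <;> omega
      · have hab : ad = bd := by omega
        rw [if_neg h1, if_neg h2, ih]
        have h : ((ad :: (keyOn a rest ++ [PySem.List.pyGetD a 0 0])) <
            (bd :: (keyOn b rest ++ [PySem.List.pyGetD b 0 0]))) ↔
            ((keyOn a rest ++ [PySem.List.pyGetD a 0 0]) <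
             (keyOn b rest ++ [PySem.List.pyGetD b 0 0])) := by
          rw [List.cons_lt_cons_iff]
          constructor
          · rintro (h | ⟨-, h⟩)
            · omega
            · exact h
          · intro h; exact Or.inr ⟨hab, h⟩
        by_cases hc : (keyOn a rest ++ [PySem.List.pyGetD a 0 0]) <
            (keyOn b rest ++ [PySem.List.pyGetD b 0 0])
        · rw [if_pos hc, if_pos (h.2 hc)]
        · rw [if_neg hc, if_neg (fun hx => hc (h.1 hx))]

theorem most_compact_closed (a b : List Int) (h : a.length = b.length) :
    most_compact a b = if nf_key a < nf_key b then a else b := by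
  rw [most_compact, mcLoop_closed]
  simp only [nf_key, keyOn, h]

-- folding most_compact equals the first-minimum fold of Python's min(., key=...)
theorem fold_mc_eq (xs : List (List Int)) : ∀ (x : List Int),
    (∀ y ∈ xs, y.length = x.length) →
    (x :: xs).Pairwise (fun a b => nf_key a ≠ nf_key b) →
    xs.foldl most_compact x = xs.foldl (fun m y => if nf_key y < nf_key m then y else m) x := by
  induction xs with
  | nil => intro x _ _; rfl
  | cons y ys ih =>
    intro x hlen hpw
    have hxy : y.length = x.length := hlen y (by simp)
    have hne : nf_key x ≠ nf_key y := (List.pairwise_cons.1 hpw).1 y (by simp)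
    have hmc : most_compact x y = if nf_key x < nf_key y then x else y :=
      most_compact_closed x y hxy.symm
    have hz2 : (if nf_key y < nf_key x then y else x) = (if nf_key x < nf_key y then x else y) := by
      rcases lt_trichotomy (nf_key x) (nf_key y) with h | h | h
      · rw [if_pos h, if_neg (lt_asymm h)]
      · exact absurd h hne
      · rw [if_pos h, if_neg (lt_asymm h)]
    simp only [List.foldl_cons]
    rw [hmc, hz2]
    set z := if nf_key x < nf_key y then x else y with hzdef
    have hzor : z = x ∨ z = y := by rw [hzdef]; split_ifs <;> tauto
    have hzlen : z.length = x.length := by rcases hzor with h | h <;> rw [h]; exact hxy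
    have h1 := List.pairwise_cons.1 hpw
    have h2 := List.pairwise_cons.1 h1.2
    apply ih z
    · intro w hw
      rw [hzlen]; exact hlen w (by simp [hw])
    · rw [List.pairwise_cons]
      refine ⟨?_, h2.2⟩
      intro w hw
      rcases hzor with h | h <;> rw [h]
      · exact h1.1 w (by simp [hw])
      · exact h2.1 w hw

theorem min?_cons_foldl (x : List Int) (xs : List (List Int)) :
    PySem.List.min? (x :: xs) nf_key =
      some (xs.foldl (fun m y => if nf_key y < nf_key m then y else m) x) := by
  induction xs generalizing x with
  | nil => rfl
  | cons y ys ih =>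
    have step : PySem.List.min? (x :: y :: ys) nf_key =
        PySem.List.min? ((if nf_key y < nf_key x then y else x) :: ys) nf_key := by
      by_cases h : nf_key y < nf_key x
      · rw [if_pos h]
        show List.foldl _ (if nf_key y < nf_key x then some y else some x) ys =
          List.foldl _ (some y) ys
        rw [if_pos h]
      · rw [if_neg h]
        show List.foldl _ (if nf_key y < nf_key x then some y else some x) ys =
          List.foldl _ (some x) ys
        rw [if_neg h]
    rw [step, ih, List.foldl_cons]

-- rotations
theorem rotate_eq (u : List Int) (k : Int) (hk : 0 ≤ k) :
    rotate_sequence u k = u.drop k.toNat ++ u.take k.toNat := by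
  rw [rotate_sequence, PySem.List.slice_from u hk, PySem.List.slice_to u hk]

theorem length_rotate (u : List Int) (k : Int) (hk : 0 ≤ k) :
    (rotate_sequence u k).length = u.length := by
  rw [rotate_eq u k hk]
  simp only [List.length_append, List.length_drop, List.length_take]
  omega

theorem mem_rotate (u : List Int) (k : Int) (hk : 0 ≤ k) (x : Int) :
    x ∈ rotate_sequence u k ↔ x ∈ u := by
  rw [rotate_eq u k hk]
  exact (List.perm_append_comm.trans (by rw [List.take_append_drop])).mem_iff

theorem rotate_head (u : List Int) (k : Int) (hk : 0 ≤ k) (hlt : k < (u.length : Int)) :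
    PySem.List.pyGetD (rotate_sequence u k) 0 0 = u[k.toNat]'(by omega) := by
  have hk' : k.toNat < u.length := by omega
  rw [rotate_eq u k hk, PySem.List.pyGetD_zero, List.getD_eq_getElem?_getD,
    List.getElem?_append_left (by simp only [List.length_drop]; omega),
    List.getElem?_drop, Nat.add_zero, List.getElem?_eq_getElem hk']
  rfl

theorem key_rotate_inj (u : List Int) (hu : u.Nodup) (a b : Int)
    (ha0 : 0 ≤ a) (ha1 : a < (u.length : Int)) (hb0 : 0 ≤ b) (hb1 : b < (u.length : Int))
    (hne : a ≠ b) : nf_key (rotate_sequence u a) ≠ nf_key (rotate_sequence u b) := by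
  intro h
  rw [nf_key, nf_key, length_rotate u a ha0, length_rotate u b hb0] at h
  have h2 := (List.append_inj h (by simp)).2
  have h3 : PySem.List.pyGetD (rotate_sequence u a) 0 0 =
      PySem.List.pyGetD (rotate_sequence u b) 0 0 := by
    injection h2
  rw [rotate_head u a ha0 ha1, rotate_head u b hb0 hb1] at h3
  have h4 : a.toNat = b.toNat := by
    by_contra hne'
    exact hne' (List.Nodup.getElem_inj_iff hu |>.1 h3)
  omega

-- membership through normal_form
theorem most_compact_eq_or (a b : List Int) : most_compact a b = a ∨ most_compact a b = b :=
  mcLoop_eq_or a b _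

theorem mem_normal_form (xs : List Int) (x : Int) : x ∈ normal_form xs ↔ x ∈ xs := by
  rw [normal_form]
  set u := PySem.List.sorted (PySem.Set.ofList xs) (fun x => x) false with hu
  have hmemu : ∀ y : Int, y ∈ u ↔ y ∈ xs := by
    intro y
    rw [hu, (PySem.List.sorted_perm (PySem.Set.ofList xs) (fun x => x) false).mem_iff,
      PySem.Set.mem_ofList]
  have haux : ∀ (l : List Int) (best : List Int), (∀ i ∈ l, (0 : Int) ≤ i) → (x ∈ best ↔ x ∈ u) →
      (x ∈ l.foldl (fun b i => most_compact b (rotate_sequence u i)) best ↔ x ∈ u) := by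
    intro l
    induction l with
    | nil => intro best _ hb; exact hb
    | cons i l ih =>
      intro best hpos hb
      simp only [List.foldl_cons]
      apply ih _ (fun j hj => hpos j (by simp [hj]))
      rcases most_compact_eq_or best (rotate_sequence u i) with h | h <;> rw [h]
      · exact hb
      · exact mem_rotate u i (hpos i (by simp)) x
  rw [haux _ u (fun i hi => by
      have := (PySem.List.mem_pyRange_one).1 hi; omega) Iff.rfl]
  exact hmemu x

-- sorted deduplication only depends on membership
theorem sorted_set_ext (xs ys : List Int) (h : ∀ x, x ∈ xs ↔ x ∈ ys) :
    PySem.List.sorted (PySem.Set.ofList xs) (fun x => x) false =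
    PySem.List.sorted (PySem.Set.ofList ys) (fun x => x) false := by
  apply (PySem.List.sorted_id_eq_sorted_id_iff_perm _ _).2
  rw [List.perm_ext_iff_of_nodup (PySem.Set.nodup_ofList xs) (PySem.Set.nodup_ofList ys)]
  intro a
  rw [PySem.Set.mem_ofList, PySem.Set.mem_ofList]
  exact h a

-- the core: A's rotation fold on a nodup list equals B's min-by-key over all rotations
theorem nf_core (v : List Int) (hv : v.Nodup) :
    (PySem.List.pyRange 1 (v.length : Int) 1).foldl
      (fun best i => most_compact best (rotate_sequence v i)) v =
    (if v = [] then []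
     else (PySem.List.min? ((PySem.List.pyRange 0 (v.length : Int) 1).map
        (fun k => PySem.List.slice v (some k) none ++ PySem.List.slice v none (some k))) nf_key).getD []) := by
  by_cases hv0 : v = []
  · subst hv0
    rw [if_pos rfl, PySem.List.pyRange_one_eq_nil (by simp)]
    rfl
  · rw [if_neg hv0]
    have hn : 0 < (v.length : Int) := by
      have : v.length ≠ 0 := fun h => hv0 (List.eq_nil_of_length_eq_zero h)
      omega
    have hsl : ∀ k : Int, PySem.List.slice v (some k) none ++ PySem.List.slice v none (some k) =
        rotate_sequence v k := fun k => rfl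
    have hrot0 : rotate_sequence v 0 = v := by
      rw [rotate_eq v 0 le_rfl]
      simp
    rw [PySem.List.pyRange_one_cons hn]
    simp only [List.map_cons, hsl, hrot0, zero_add]
    rw [min?_cons_foldl, Option.getD_some]
    rw [show (PySem.List.pyRange 1 (v.length : Int) 1).foldl
        (fun best i => most_compact best (rotate_sequence v i)) v =
        ((PySem.List.pyRange 1 (v.length : Int) 1).map (rotate_sequence v)).foldl most_compact v
      from (List.foldl_map).symm]
    have hmemR : ∀ i ∈ PySem.List.pyRange 1 (v.length : Int) 1, 0 ≤ i ∧ i < (v.length : Int) := by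
      intro i hi
      have := PySem.List.mem_pyRange_one.1 hi
      omega
    have hlen : ∀ y ∈ (PySem.List.pyRange 1 (v.length : Int) 1).map (rotate_sequence v),
        y.length = v.length := by
      intro y hy
      obtain ⟨i, hi, rfl⟩ := List.mem_map.1 hy
      exact length_rotate v i (hmemR i hi).1
    have hpw : (v :: (PySem.List.pyRange 1 (v.length : Int) 1).map (rotate_sequence v)).Pairwise
        (fun a b => nf_key a ≠ nf_key b) := by
      have hfull : ((PySem.List.pyRange 0 (v.length : Int) 1).map (rotate_sequence v)).Pairwise
          (fun a b => nf_key a ≠ nf_key b) := by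
        rw [List.pairwise_map]
        have h0 : (PySem.List.pyRange 0 (v.length : Int) 1).Pairwise (· < ·) :=
          PySem.List.pairwise_lt_pyRange_one 0 (v.length : Int)
        have h1 := (List.Pairwise.and_mem.1 h0)
        refine h1.imp ?_
        rintro a b ⟨ha, hb, hab⟩
        have ha' := PySem.List.mem_pyRange_one.1 ha
        have hb' := PySem.List.mem_pyRange_one.1 hb
        exact key_rotate_inj v hv a b ha'.1 ha'.2 hb'.1 hb'.2 (by omega)
      rw [PySem.List.pyRange_one_cons hn, List.map_cons, hrot0, zero_add] at hfull
      exact hfull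
    exact fold_mc_eq _ v hlen hpw

-- membership in A's accumulation loop
theorem mem_dedup_fold (zs : List Int) : ∀ (acc : List Int) (x : Int),
    (x ∈ zs.foldl (fun acc2 element => if element ∈ acc2 then acc2 else acc2 ++ [element]) acc ↔
    x ∈ acc ∨ x ∈ zs) := by
  induction zs with
  | nil => intro acc x; simp
  | cons z zs ih =>
    intro acc x
    simp only [List.foldl_cons]
    by_cases h : z ∈ acc
    · rw [if_pos h, ih]
      simp only [List.mem_cons]
      constructor
      · rintro (hx | hx)
        · exact Or.inl hx
        · exact Or.inr (Or.inr hx)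
      · rintro (hx | hx | hx)
        · exact Or.inl hx
        · exact Or.inl (hx ▸ h)
        · exact Or.inr hx
    · rw [if_neg h, ih]
      simp only [List.mem_append, List.mem_cons]
      tauto

-- membership in A's outer loop over the multiplier
theorem mem_outer_fold (F : Int → List Int) (ms : List Int) : ∀ (acc : List Int) (x : Int),
    (x ∈ ms.foldl (fun acc i =>
        (F i).foldl (fun acc2 element => if element ∈ acc2 then acc2 else acc2 ++ [element]) acc)
      acc ↔ x ∈ acc ∨ ∃ i ∈ ms, x ∈ F i) := by
  induction ms with
  | nil => intro acc x; simp
  | cons m ms ih =>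
    intro acc x
    simp only [List.foldl_cons]
    rw [ih, mem_dedup_fold]
    simp only [List.mem_cons]
    constructor
    · rintro ((hx | hx) | ⟨i, hi, hx⟩)
      · exact Or.inl hx
      · exact Or.inr ⟨m, Or.inl rfl, hx⟩
      · exact Or.inr ⟨i, Or.inr hi, hx⟩
    · rintro (hx | ⟨i, hi | hi, hx⟩)
      · exact Or.inl (Or.inl hx)
      · exact Or.inl (Or.inr (hi ▸ hx))
      · exact Or.inr ⟨i, hi, hx⟩

theorem normal_form_eq_of_sorted_eq {xs ys : List Int}
    (h : PySem.List.sorted (PySem.Set.ofList xs) (fun x => x) false =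
         PySem.List.sorted (PySem.Set.ofList ys) (fun x => x) false) :
    normal_form xs = normal_form ys := by
  simp only [normal_form, h]

theorem mod12_absorb (x i : Int) :
    PySem.Int.mod (PySem.Int.mod x 12 + i) 12 = PySem.Int.mod (x + i) 12 := by
  have h : (0 : Int) < 12 := by norm_num
  rw [PySem.Int.mod_eq_emod_of_pos h, PySem.Int.mod_eq_emod_of_pos h,
    PySem.Int.mod_eq_emod_of_pos h, Int.emod_add_emod]

-- ===== VERDICT (by name: the statement is the Claim_ definition above) =====
theorem simple_multiplication_spec : Claim_equal_simple_multiplication := by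
  unfold Claim_equal_simple_multiplication
  intro multiplicand multiplier _hdom hpre
  unfold Spec_simple_multiplication
  obtain ⟨q, rest, rfl⟩ : ∃ q rest, multiplicand = q :: rest := by
    cases multiplicand with
    | nil => exact absurd rfl hpre
    | cons q rest => exact ⟨q, rest, rfl⟩
  rw [simple_multiplication, simple_multiplication_alt, PySem.List.pyGet?_zero_cons]
  simp only
  have hois0 : PySem.List.pyGetD (transposition_pitch_classes (q :: rest) (-q)) 0 0 = 0 := by
    simp [transposition_pitch_classes, PySem.List.pyGetD_zero]
  have hT : ∀ i : Int,
      transposition_pitch_classes (transposition_pitch_classes (q :: rest) (-q))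
        (i - PySem.List.pyGetD (transposition_pitch_classes (q :: rest) (-q)) 0 0) =
      (q :: rest).map (fun p => PySem.Int.mod (p - q + i) 12) := by
    intro i
    rw [hois0, sub_zero]
    simp only [transposition_pitch_classes, List.map_map]
    refine List.map_congr_left ?_
    intro p _
    simp only [Function.comp_apply]
    rw [mod12_absorb, sub_eq_add_neg]
  set FL := List.flatMap (fun p => List.map (fun i => PySem.Int.mod (p - q + i) 12) multiplier)
    (q :: rest) with hFL
  have hmem : ∀ x : Int,
      (x ∈ List.foldl
        (fun acc i =>
          List.foldl (fun acc2 element => if element ∈ acc2 then acc2 else acc2 ++ [element]) acc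
            (normal_form
              (transposition_pitch_classes (transposition_pitch_classes (q :: rest) (-q))
                (i - PySem.List.pyGetD (transposition_pitch_classes (q :: rest) (-q)) 0 0))))
        [] multiplier ↔ x ∈ FL) := by
    intro x
    rw [mem_outer_fold]
    simp only [List.not_mem_nil, false_or]
    simp only [mem_normal_form, hT]
    rw [hFL]
    simp only [List.mem_flatMap, List.mem_map]
    constructor
    · rintro ⟨i, hi, p, hp, rfl⟩
      exact ⟨p, hp, i, hi, rfl⟩
    · rintro ⟨p, hp, i, hi, rfl⟩
      exact ⟨i, hi, p, hp, rfl⟩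
  have hnodup : (PySem.List.sorted (PySem.Set.ofList FL) (fun x => x) false).Nodup :=
    ((PySem.List.sorted_perm _ _ _).nodup_iff).2 (PySem.Set.nodup_ofList _)
  have hS := sorted_set_ext _ FL hmem
  rw [normal_form_eq_of_sorted_eq hS]
  simp only [normal_form]
  exact nf_core _ hnodup
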